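-- pv_equiv track=rewrite | github.com/AdamZhouSE/pythonHomework | Code/CodeRecords/2416/60580/316580.py | count
-- ===== SOURCE A (Python) =====
-- def count(array):
--     list = []
--     for i in range(len(array) - 1):
--         acount = 0
--         num = i
--         while num < len(array) - 1 and array[num] + array[num + 1] == 1:
--             acount = acount + 1
--             num = num + 1
--         list.append(acount)
--     return max(list) + 1
-- ===== SOURCE B (Python) =====
-- def count(array):
--     best = 0
--     cur = 0
--     for a, b in zip(array, array[1:]):
--         cur = cur + 1 if a + b == 1 else 0
--         if cur > best:
--             best = cur
--     return best + 1
-- ===== Notes on version B (the rewrite author's own statement) =====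
-- stated objective: faster
-- what changed: Replaced the per-start-index rescan (for every i, a while loop re-walks the run of adjacent pairs summing to 1) by a single pass over adjacent pairs that maintains the current and maximal run length.
-- outside the precondition, e.g. on count([]): A raises ValueError, B returns 1
import Mathlib
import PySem

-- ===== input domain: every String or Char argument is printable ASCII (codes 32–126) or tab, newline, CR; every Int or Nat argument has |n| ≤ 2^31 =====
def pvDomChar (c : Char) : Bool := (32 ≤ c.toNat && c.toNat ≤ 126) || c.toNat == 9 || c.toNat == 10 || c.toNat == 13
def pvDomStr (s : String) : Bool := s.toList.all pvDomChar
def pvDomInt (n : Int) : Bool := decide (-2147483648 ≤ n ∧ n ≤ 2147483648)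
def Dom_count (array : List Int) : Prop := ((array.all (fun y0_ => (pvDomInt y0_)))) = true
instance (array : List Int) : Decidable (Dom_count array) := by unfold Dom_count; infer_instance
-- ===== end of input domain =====

-- B replaces A's per-start-index rescan by one linear pass tracking the current/maximal run of adjacent pairs summing to 1.

-- ===== PORT A =====
-- inner while loop of A: counts, from index num, the consecutive adjacent pairs summing to 1
-- (both indexings are guarded in range by the loop condition, so getD is exact for array[num], array[num+1])
def runA (array : List Int) (num : Nat) : Int :=
  if num < array.length - 1 ∧ array.getD num 0 + array.getD (num + 1) 0 = 1 then
    1 + runA array (num + 1)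
  else 0
termination_by array.length - 1 - num
decreasing_by omega

def count (array : List Int) : Int :=
  let lst := (List.range (array.length - 1)).map (fun i => runA array i)
  match lst.max? with
  | some m => m + 1
  | none => 0   -- Python raises ValueError here (max of empty list); excluded by Pre_count

-- ===== PORT B =====
def count_alt (array : List Int) : Int :=
  let st := (array.zip (List.drop 1 array)).foldl    -- array[1:] = drop 1 (exact for lists)
      (fun (s : Int × Int) (p : Int × Int) =>
        let cur : Int := if p.1 + p.2 = 1 then s.2 + 1 else 0
        (if s.1 < cur then cur else s.1, cur))
      (0, 0)
  st.1 + 1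

-- ===== PRECONDITION & SPEC =====
-- Pre_ excludes arrays of length < 2, on which A's max([]) raises ValueError.
def Pre_count (array : List Int) : Prop := 2 ≤ array.length
instance (array : List Int) : Decidable (Pre_count array) := by unfold Pre_count; infer_instance
def pvWitness_count : List Int := [0, 1, 5]

def Spec_count (array : List Int) (out : Int) : Prop := out = count_alt array
instance (array : List Int) (out : Int) : Decidable (Spec_count array out) := by unfold Spec_count; infer_instance

-- ===== CLAIM (what is proved, stated in full; the proofs are below) =====
def Claim_equal_count : Prop := ∀ (array : List Int), Dom_count array → Pre_count array → Spec_count array (count array)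

-- ===== LEMMAS AND PROOFS =====

-- the list of "adjacent pair sums to 1" booleans
def bools (array : List Int) : List Bool :=
  (array.zip (List.drop 1 array)).map (fun p => decide (p.1 + p.2 = 1))

def leadB : List Bool → Nat
  | [] => 0
  | b :: t => if b then leadB t + 1 else 0

-- max over all suffixes of the leading-true run
def runsN : List Bool → Nat
  | [] => 0
  | b :: t => max (leadB (b :: t)) (runsN t)

-- best run seen by the rest of B's fold, the current run being cur
def runR (cur : Nat) : List Bool → Nat
  | [] => 0
  | b :: t => max (if b then cur + 1 else 0) (runR (if b then cur + 1 else 0) t)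

-- current run after B's fold
def trailT (cur : Nat) : List Bool → Nat
  | [] => cur
  | b :: t => trailT (if b then cur + 1 else 0) t

theorem bools_length (array : List Int) : (bools array).length = array.length - 1 := by
  simp [bools]

theorem bools_getElem (array : List Int) (i : Nat) (h : i < (bools array).length) :
    (bools array)[i] = decide (array.getD i 0 + array.getD (i + 1) 0 = 1) := by
  have hl := bools_length array
  have h1 : i < array.length := by omega
  have h2 : i + 1 < array.length := by omega
  simp [bools, List.getElem_zip, List.getD_eq_getElem?_getD,
    List.getElem?_eq_getElem h1, List.getElem?_eq_getElem h2]

theorem runA_eq (k : Nat) (array : List Int) (num : Nat)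
    (hk : array.length - 1 - num ≤ k) :
    runA array num = ((leadB ((bools array).drop num) : Nat) : Int) := by
  induction k generalizing num with
  | zero =>
    rw [runA, if_neg (by omega)]
    rw [List.drop_of_length_le (by rw [bools_length]; omega)]
    simp [leadB]
  | succ k ih =>
    by_cases h : num < array.length - 1 ∧ array.getD num 0 + array.getD (num + 1) 0 = 1
    · have hlt : num < (bools array).length := by rw [bools_length]; omega
      rw [runA, if_pos h, List.drop_eq_getElem_cons hlt, bools_getElem array num hlt]
      have hc : decide (array.getD num 0 + array.getD (num + 1) 0 = 1) = true := by
        simpa using h.2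
      rw [hc, ih (num + 1) (by omega)]
      simp [leadB]; omega
    · rw [runA, if_neg h]
      rcases Nat.lt_or_ge num (bools array).length with hlt | hge
      · rw [List.drop_eq_getElem_cons hlt, bools_getElem array num hlt]
        have hn : ¬ (array.getD num 0 + array.getD (num + 1) 0 = 1) := by
          have := bools_length array
          intro hc; exact h ⟨by omega, hc⟩
        have hd : decide (array.getD num 0 + array.getD (num + 1) 0 = 1) = false := by
          simpa using hn
        rw [hd]; simp [leadB]
      · rw [List.drop_of_length_le hge]; simp [leadB]

theorem leadB_le_runsN (l : List Bool) : leadB l ≤ runsN l := by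
  cases l with
  | nil => simp [leadB, runsN]
  | cons b t => simp [runsN]

theorem runR_eq (l : List Bool) : ∀ cur : Nat,
    runR cur l = max (runsN l) (if leadB l = 0 then 0 else cur + leadB l) := by
  induction l with
  | nil => intro cur; simp [runR, runsN, leadB]
  | cons b t ih =>
    intro cur
    have hle := leadB_le_runsN t
    cases b with
    | false =>
      simp only [runR, runsN, leadB, Bool.false_eq_true, if_false]
      rw [ih 0]
      by_cases hb : leadB t = 0 <;> simp [hb] <;> omega
    | true =>
      simp only [runR, runsN, leadB, if_true]
      rw [ih (cur + 1)]
      by_cases hb : leadB t = 0 <;> simp [hb] <;> omega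

theorem runR_zero (l : List Bool) : runR 0 l = runsN l := by
  rw [runR_eq]
  have := leadB_le_runsN l
  by_cases hb : leadB l = 0 <;> simp [hb] <;> omega

-- A's max over start indices equals runsN
theorem max?_runA (bs : List Bool) (hne : bs ≠ []) :
    ((List.range bs.length).map (fun i => ((leadB (bs.drop i) : Nat) : Int))).max? =
      some ((runsN bs : Nat) : Int) := by
  induction bs with
  | nil => exact absurd rfl hne
  | cons b t ih =>
    rw [List.length_cons, List.range_succ_eq_map]
    simp only [List.map_cons, List.map_map]
    have hmap : ((List.range t.length).map ((fun i => ((leadB ((b :: t).drop i) : Nat) : Int)) ∘ Nat.succ))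
        = (List.range t.length).map (fun i => ((leadB (t.drop i) : Nat) : Int)) := by
      apply List.map_congr_left; intro i _; simp
    rw [hmap]
    rcases eq_or_ne t [] with rfl | hne'
    · simp [runsN, leadB]
    · rw [List.max?_cons, ih hne']
      simp [runsN, Nat.cast_max]

-- the loop body of B's fold (proof helper naming the port's lambda)
def stepB (s : Int × Int) (b : Bool) : Int × Int :=
  let c : Int := if b then s.2 + 1 else 0
  (if s.1 < c then c else s.1, c)

-- B's fold, componentwise in Nat
theorem fold_alt (bs : List Bool) : ∀ best cur : Nat,
    bs.foldl stepB ((best : Int), (cur : Int))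
      = (((max best (runR cur bs) : Nat) : Int), ((trailT cur bs : Nat) : Int)) := by
  induction bs with
  | nil => intro best cur; simp [runR, trailT]
  | cons b t ih =>
    intro best cur
    cases b with
    | false =>
      have hs : stepB ((best : Int), (cur : Int)) false = (((best : Nat) : Int), ((0 : Nat) : Int)) := by
        simp [stepB]
      rw [List.foldl_cons, hs, ih best 0]
      simp only [runR, trailT, Bool.false_eq_true, if_false]
      rw [show max best (max 0 (runR 0 t)) = max best (runR 0 t) from by omega]
    | true =>
      have hs : stepB ((best : Int), (cur : Int)) true
          = (((max best (cur + 1) : Nat) : Int), ((cur + 1 : Nat) : Int)) := by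
        simp only [stepB, if_true, Prod.mk.injEq]
        refine ⟨?_, by push_cast; ring⟩
        by_cases h : (best : Int) < (cur : Int) + 1 <;> simp [h] <;> push_cast at h ⊢ <;> omega
      rw [List.foldl_cons, hs, ih (max best (cur + 1)) (cur + 1)]
      simp only [runR, trailT, if_true]
      rw [show max (max best (cur + 1)) (runR (cur + 1) t) = max best (max (cur + 1) (runR (cur + 1) t)) from by omega]

theorem count_alt_eq (array : List Int) :
    count_alt array = ((runsN (bools array) : Nat) : Int) + 1 := by
  unfold count_alt
  have hfun : (fun (s : Int × Int) (p : Int × Int) =>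
        let cur : Int := if p.1 + p.2 = 1 then s.2 + 1 else 0
        (if s.1 < cur then cur else s.1, cur))
      = (fun (s : Int × Int) (p : Int × Int) => stepB s (decide (p.1 + p.2 = 1))) := by
    funext s p
    by_cases h : p.1 + p.2 = 1 <;> simp [stepB, h]
  rw [hfun, ← List.foldl_map (f := fun p : Int × Int => decide (p.1 + p.2 = 1))]
  have hb : (List.map (fun p : Int × Int => decide (p.1 + p.2 = 1)) (array.zip (List.drop 1 array)))
      = bools array := rfl
  rw [hb]
  have h := fold_alt (bools array) 0 0
  simp only [Nat.cast_zero] at h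
  rw [h]
  simp [runR_zero]

theorem count_eq (array : List Int) (h : 2 ≤ array.length) :
    count array = ((runsN (bools array) : Nat) : Int) + 1 := by
  unfold count
  have hlen : array.length - 1 = (bools array).length := (bools_length array).symm
  have hmap : (List.range (array.length - 1)).map (fun i => runA array i)
      = (List.range ((bools array).length)).map
          (fun i => ((leadB ((bools array).drop i) : Nat) : Int)) := by
    rw [hlen]
    apply List.map_congr_left
    intro i _
    exact runA_eq (array.length) array i (by omega)
  rw [hmap]
  have hne : bools array ≠ [] := by
    intro hc
    have := bools_length array
    rw [hc] at this
    simp at this; omega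
  simp only [max?_runA (bools array) hne]

-- ===== VERDICT (by name: the statement is the Claim_ definition above) =====
theorem count_spec : Claim_equal_count := by
  intro array _ hpre
  unfold Spec_count
  rw [count_eq array hpre, count_alt_eq array]
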